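-- pv_equiv track=rewrite | github.com/Advait-Sen/Encryption-Program | lib.py | intify
-- ===== SOURCE A (Python) =====
-- def intify(string=""):
--     word = [c for c in string]
--     if len(word) == 0:
--         return 0
--     ret = ord(word[0])
--     for i in range(len(word) - 1):
--         ret *= 10
--         ret += ord(word[i + 1])
--     return ret
-- ===== SOURCE B (Python) =====
-- def intify(string=""):
--     n = len(string)
--     return sum(ord(c) * 10 ** (n - 1 - i) for i, c in enumerate(string))
-- ===== Notes on version B (the rewrite author's own statement) =====
-- stated objective: alternative
-- what changed: Replaces the Horner running accumulator (multiply by 10, add next ordinal) with an explicit place-value sum: each character's ordinal is weighted by 10^(n-1-i) independently and the weighted terms are summed.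
import Mathlib
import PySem

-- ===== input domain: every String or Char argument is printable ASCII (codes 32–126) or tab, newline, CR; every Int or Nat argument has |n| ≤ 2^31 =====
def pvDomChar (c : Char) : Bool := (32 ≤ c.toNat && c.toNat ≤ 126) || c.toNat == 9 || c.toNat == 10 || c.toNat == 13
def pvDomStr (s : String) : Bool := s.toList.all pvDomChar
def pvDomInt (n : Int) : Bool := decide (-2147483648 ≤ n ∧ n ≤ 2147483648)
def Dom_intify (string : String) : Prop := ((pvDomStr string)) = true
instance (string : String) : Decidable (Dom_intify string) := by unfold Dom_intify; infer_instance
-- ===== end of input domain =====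

-- B replaces A's Horner accumulator with an independent place-value sum of weighted ordinals; alternative decomposition, same cost.

-- ===== PORT A =====
-- A: word = list(string); if empty return 0; else start from ord(word[0]) and fold
-- 'ret = ret*10 + ord(word[i+1])' over the remaining characters in order.
def intify (string : String) : Int :=
  let word := string.toList
  match word with
  | [] => 0
  | c :: rest => rest.foldl (fun ret d => ret * 10 + (d.toNat : Int)) (c.toNat : Int)

-- ===== PORT B =====
-- B: n = len(string); sum of ord(c) * 10^(n-1-i) over enumerate(string).
def intify_alt (string : String) : Int :=
  let word := string.toList
  let n := word.length
  (word.zipIdx.map (fun p => (p.1.toNat : Int) * 10 ^ (n - 1 - p.2))).sum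

-- ===== PRECONDITION & SPEC =====
def Spec_intify (string : String) (out : Int) : Prop := out = intify_alt string
instance (string : String) (out : Int) : Decidable (Spec_intify string out) := by unfold Spec_intify; infer_instance

-- ===== CLAIM (what is proved, stated in full; the proofs are below) =====
def Claim_equal_intify : Prop := ∀ (string : String), Dom_intify string → Spec_intify string (intify string)

-- ===== LEMMAS AND PROOFS =====

-- Horner fold with an arbitrary accumulator splits off the accumulator.
theorem horner_acc (l : List Char) (acc : Int) :
    l.foldl (fun ret d => ret * 10 + (d.toNat : Int)) acc
      = acc * 10 ^ l.length + l.foldl (fun ret d => ret * 10 + (d.toNat : Int)) 0 := by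
  induction l generalizing acc with
  | nil => simp
  | cons c t ih =>
    simp only [List.foldl_cons, List.length_cons]
    rw [ih (acc * 10 + (c.toNat : Int)), ih (0 * 10 + (c.toNat : Int))]
    ring

-- The place-value sum over zipIdx at any offset k, with exponent (k + len - 1 - index),
-- equals the Horner fold from 0.
theorem placevalue_eq_horner (l : List Char) (k : Nat) :
    ((l.zipIdx k).map (fun p => (p.1.toNat : Int) * 10 ^ (k + l.length - 1 - p.2))).sum
      = l.foldl (fun ret d => ret * 10 + (d.toNat : Int)) 0 := by
  induction l generalizing k with
  | nil => simp
  | cons c t ih =>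
    simp only [List.zipIdx_cons, List.map_cons, List.sum_cons, List.length_cons,
      List.foldl_cons]
    have e1 : k + (t.length + 1) - 1 - k = t.length := by omega
    have e2 : ((t.zipIdx (k + 1)).map
        (fun p => (p.1.toNat : Int) * 10 ^ (k + (t.length + 1) - 1 - p.2))).sum
        = ((t.zipIdx (k + 1)).map
        (fun p => (p.1.toNat : Int) * 10 ^ ((k + 1) + t.length - 1 - p.2))).sum := by
      congr 1
      apply List.map_congr_left
      intro p _
      congr 2
      omega
    rw [e1, e2, ih (k + 1), horner_acc t (0 * 10 + (c.toNat : Int))]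
    ring

-- ===== VERDICT (by name: the statement is the Claim_ definition above) =====
theorem intify_spec : Claim_equal_intify := by
  intro s _
  unfold Spec_intify intify intify_alt
  cases h : s.toList with
  | nil => simp
  | cons c t =>
    simp only []
    have := placevalue_eq_horner (c :: t) 0
    simp only [List.length_cons, Nat.zero_add] at this ⊢
    rw [this]
    simp
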